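-- pv_equiv track=rewrite | github.com/timothymcmackin/adventofcode | 2017/10.py | swapList
-- ===== SOURCE A (Python) =====
-- def swapList(l, passedPos, length):
--     pos = passedPos
--     elementsWrapped = 0
--     if pos + length > len(l):
--         elementsWrapped = abs(len(l) - pos - length)
--         pos -= elementsWrapped
--         for i in range(elementsWrapped):
--             # remove elements from the front
--             temp = l.pop(0)
--             # add to the back
--             l.append(temp)
--
--     # swap the number of elements in the length
--     tempList = []
--     for i in range(length):
--         elementToPop = min(pos, len(l) - 1)
--         tempList.append(l.pop(elementToPop))
--     for i in range(length):
--         l.insert(pos, tempList.pop(0))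
--
--     # If we wrapped elements, reverse them back
--     for i in range(elementsWrapped):
--         temp = l.pop()
--         l.insert(0, temp)
--
--     return l
-- ===== SOURCE B (Python) =====
-- def swapList(l, passedPos, length):
--     n = len(l)
--     seg = [l[(passedPos + i) % n] for i in range(length)]
--     seg.reverse()
--     for i in range(length):
--         l[(passedPos + i) % n] = seg[i]
--     return l
-- ===== Notes on version B (the rewrite author's own statement) =====
-- stated objective: faster
-- what changed: A rotates the whole list to unwrap the segment, then pops and re-inserts each element (each pop/insert shifting the list); B gathers the segment with modular indexing, reverses it once, and scatters it back by direct indexed assignment, with no rotation and no pops.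
-- outside the precondition, e.g. on swapList([10, 11, 12], -1, 1): A returns [10, 12, 11], B returns [10, 11, 12]; on swapList([], 0, 1): A raises IndexError, B raises ZeroDivisionError; on swapList([10, 11, 12], 0, 4): A raises IndexError, B returns [10, 12, 11]
import Mathlib
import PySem

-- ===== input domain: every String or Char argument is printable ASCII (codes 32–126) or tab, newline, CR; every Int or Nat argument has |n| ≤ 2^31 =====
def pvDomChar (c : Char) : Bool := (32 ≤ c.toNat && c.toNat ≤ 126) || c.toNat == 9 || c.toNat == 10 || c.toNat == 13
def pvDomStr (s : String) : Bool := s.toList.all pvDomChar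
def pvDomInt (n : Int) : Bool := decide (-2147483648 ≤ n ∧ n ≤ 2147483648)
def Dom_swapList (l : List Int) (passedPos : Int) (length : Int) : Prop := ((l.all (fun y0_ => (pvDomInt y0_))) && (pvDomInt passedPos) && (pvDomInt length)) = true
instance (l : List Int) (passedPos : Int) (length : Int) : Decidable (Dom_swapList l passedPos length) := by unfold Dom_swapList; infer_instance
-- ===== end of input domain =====

-- B replaces A's rotate/pop/insert scheme by a gather-reverse-scatter with modular indexing
-- (objective: faster — fewer and cheaper list operations per element); return value proved equal on
-- Pre_. A mutates l in place in Python; B performs the same final in-place mutation; the theorems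
-- are about the return value.


-- ===== PORT A =====
-- loop bodies of A, named so the proofs can speak about them
-- temp = l.pop(0); l.append(temp)
def pvRot (acc : List Int) : List Int :=
  match PySem.List.pop? acc 0 with
  | some (t, rest) => rest ++ [t]
  | none => acc
-- temp = l.pop(); l.insert(0, temp)
def pvUnrot (acc : List Int) : List Int :=
  match PySem.List.pop? acc (-1) with
  | some (t, rest) => PySem.List.insert rest 0 t
  | none => acc
-- elementToPop = min(pos, len(l) - 1); tempList.append(l.pop(elementToPop))
def pvPopStep (pos : Int) (st : List Int × List Int) : List Int × List Int :=
  let e := min pos ((st.1.length : Int) - 1)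
  match PySem.List.pop? st.1 e with
  | some (v, rest) => (rest, st.2 ++ [v])
  | none => st
-- l.insert(pos, tempList.pop(0))
def pvInsStep (pos : Int) (st : List Int × List Int) : List Int × List Int :=
  match PySem.List.pop? st.2 0 with
  | some (v, rest) => (PySem.List.insert st.1 pos v, rest)
  | none => st

def swapList (l : List Int) (passedPos : Int) (length : Int) : List Int :=
  let n : Int := l.length
  let wrap := passedPos + length > n
  let ew : Nat := if wrap then (n - passedPos - length).natAbs else 0
  let pos : Int := if wrap then passedPos - ew else passedPos
  let l1 : List Int := if wrap then (List.range ew).foldl (fun acc _ => pvRot acc) l else l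
  let st1 : List Int × List Int :=
    (List.range length.toNat).foldl (fun st _ => pvPopStep pos st) (l1, [])
  let st2 : List Int × List Int :=
    (List.range length.toNat).foldl (fun st _ => pvInsStep pos st) st1
  (List.range ew).foldl (fun acc _ => pvUnrot acc) st2.1

-- ===== PORT B =====
-- l[(passedPos+i) % n] read is PySem.List.pyGetD and the write is PySem.List.pySetD (both exact
-- under Pre_, where the index is in range); % is PySem.Int.mod.
def pvBStep (seg : List Int) (pos n : Int) (acc : List Int) (i : Nat) : List Int :=
  PySem.List.pySetD acc (PySem.Int.mod (pos + (i : Int)) n) (seg.getD i 0)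

def swapList_alt (l : List Int) (passedPos : Int) (length : Int) : List Int :=
  let n : Int := l.length
  let seg : List Int := (List.range length.toNat).map
      (fun (i : Nat) => PySem.List.pyGetD l (PySem.Int.mod (passedPos + (i : Int)) n) 0)
  let seg := seg.reverse
  (List.range length.toNat).foldl (pvBStep seg passedPos n) l

-- ===== PRECONDITION & SPEC =====
-- Pre_ restricts to the function's natural domain: it excludes inputs where A raises IndexError
-- (length > len(l), or an empty list that must wrap) and negative passedPos with positive length,
-- where A's returned value is an accident of Python's negative-index wraparound in pop.
def Pre_swapList (l : List Int) (passedPos : Int) (length : Int) : Prop :=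
  length ≤ (l.length : Int) ∧ (0 ≤ passedPos ∨ length ≤ 0) ∧
    (l ≠ [] ∨ (length ≤ 0 ∧ passedPos + length ≤ 0))
instance (l : List Int) (passedPos : Int) (length : Int) : Decidable (Pre_swapList l passedPos length) := by unfold Pre_swapList; infer_instance
def pvWitness_swapList : List Int × Int × Int := ([1, 2, 3, 4, 5], 3, 4)

def Spec_swapList (l : List Int) (passedPos : Int) (length : Int) (out : List Int) : Prop := out = swapList_alt l passedPos length
instance (l : List Int) (passedPos : Int) (length : Int) (out : List Int) : Decidable (Spec_swapList l passedPos length out) := by unfold Spec_swapList; infer_instance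

-- ===== CLAIM (what is proved, stated in full; the proofs are below) =====
def Claim_equal_swapList : Prop := ∀ (l : List Int) (passedPos : Int) (length : Int), Dom_swapList l passedPos length → Pre_swapList l passedPos length → Spec_swapList l passedPos length (swapList l passedPos length)

-- ===== LEMMAS AND PROOFS =====

-- the common value of both programs: segment [pos, pos+length) (mod n) reversed in place
def pvTarget (l : List Int) (pos length : Int) : List Int :=
  List.ofFn (fun j : Fin l.length =>
    let n : Int := l.length
    let d := ((j.1 : Int) - pos) % n
    if d < length then l.getD ((pos + length - 1 - d) % n).toNat 0 else l[j])

theorem foldl_range_const {α : Type} (f : α → α) (x : α) (k : Nat) :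
    (List.range k).foldl (fun a _ => f a) x = f^[k] x := by
  induction k with
  | zero => rfl
  | succ k ih =>
      rw [List.range_succ, List.foldl_append, ih, Function.iterate_succ_apply']
      rfl

theorem pvRot_eq_rotate (x : List Int) : pvRot x = x.rotate 1 := by
  cases x with
  | nil => rfl
  | cons a xs => simp [pvRot, PySem.List.pop?_zero_cons, List.rotate_cons_succ]

theorem pvUnrot_pvRot (x : List Int) : pvUnrot (pvRot x) = x := by
  cases x with
  | nil => rfl
  | cons a xs =>
      simp only [pvRot, PySem.List.pop?_zero_cons]
      simp [pvUnrot, PySem.List.pop?_last, PySem.List.insert_zero]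

theorem rot_iterate (k : Nat) (x : List Int) : pvRot^[k] x = x.rotate k := by
  induction k with
  | zero => simp
  | succ k ih => rw [Function.iterate_succ_apply', ih, pvRot_eq_rotate, List.rotate_rotate]

theorem unrot_rot_iterate (k : Nat) : ∀ x : List Int, pvUnrot^[k] (pvRot^[k] x) = x := by
  induction k with
  | zero => intro x; rfl
  | succ k ih =>
      intro x
      rw [Function.iterate_succ_apply pvRot, Function.iterate_succ_apply' pvUnrot, ih,
        pvUnrot_pvRot]

-- the modular-index correspondence behind both programs
theorem idx_iff (N : Nat) (pos : Int) (j : Nat) (hj : j < N) (k : Int) (hk0 : 0 ≤ k)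
    (hkN : k < (N : Int)) :
    ((j : Int) - pos) % (N : Int) = k ↔ (j : Int) = (pos + k) % (N : Int) := by
  have hj' : (j : Int) % (N : Int) = j := Int.emod_eq_of_lt (by positivity) (by exact_mod_cast hj)
  have hk' : k % (N : Int) = k := Int.emod_eq_of_lt hk0 hkN
  constructor
  · intro h
    have h1 : ((j : Int) - pos) % (N : Int) = k % (N : Int) := by rw [h, hk']
    rw [Int.emod_eq_emod_iff_emod_sub_eq_zero] at h1
    have h2 : ((j : Int) - (pos + k)) % (N : Int) = 0 := by
      rw [show (j : Int) - (pos + k) = (j - pos) - k by ring]; exact h1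
    rw [← Int.emod_eq_emod_iff_emod_sub_eq_zero] at h2
    rw [← hj', h2]
  · intro h
    have h2 : (j : Int) % (N : Int) = (pos + k) % (N : Int) := by rw [hj', h]
    rw [Int.emod_eq_emod_iff_emod_sub_eq_zero] at h2
    have h3 : (((j : Int) - pos) - k) % (N : Int) = 0 := by
      rw [show (j : Int) - pos - k = j - (pos + k) by ring]; exact h2
    rw [← Int.emod_eq_emod_iff_emod_sub_eq_zero] at h3
    rw [h3, hk']

theorem B_trivial (l : List Int) (pos length : Int) (h : length ≤ 0) :
    swapList_alt l pos length = l := by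
  simp [swapList_alt, Int.toNat_of_nonpos h]

theorem A_trivial (l : List Int) (pos length : Int) (h : length ≤ 0) :
    swapList l pos length = l := by
  by_cases hw : pos + length > (l.length : Int)
  · simp only [swapList, if_pos hw, Int.toNat_of_nonpos h, List.range_zero, List.foldl_nil,
      foldl_range_const]
    exact unrot_rot_iterate _ l
  · simp [swapList, if_neg hw, Int.toNat_of_nonpos h]

theorem B_loop (l : List Int) (pos length : Int) (seg : List Int)
    (h1 : 1 ≤ length) (h2 : length ≤ (l.length : Int))
    (hseg : ∀ k : Nat, k < length.toNat →
      seg.getD k 0 = l.getD (((pos + length - 1 - (k : Int)) % (l.length : Int)).toNat) 0) :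
    ∀ k : Nat, k ≤ length.toNat →
      (List.range k).foldl (pvBStep seg pos (l.length : Int)) l =
        List.ofFn (fun j : Fin l.length =>
          if ((j.1 : Int) - pos) % (l.length : Int) < (k : Int) then
            l.getD (((pos + length - 1 - (((j.1 : Int) - pos) % (l.length : Int))) %
              (l.length : Int)).toNat) 0
          else l[j]) := by
  have hN : (0 : Int) < (l.length : Int) := by omega
  intro k
  induction k with
  | zero =>
      intro _
      rw [List.range_zero, List.foldl_nil]
      rw [show (fun j : Fin l.length =>
          if ((j.1 : Int) - pos) % (l.length : Int) < ((0 : Nat) : Int) then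
            l.getD (((pos + length - 1 - (((j.1 : Int) - pos) % (l.length : Int))) %
              (l.length : Int)).toNat) 0
          else l[j]) = fun j : Fin l.length => l[j] from funext fun j => by
        rw [if_neg (not_lt.2 (by exact_mod_cast Int.emod_nonneg _ (by omega)))]]
      exact List.ofFn_getElem.symm
  | succ k ih =>
      intro hk
      have ihk := ih (by omega)
      rw [List.range_succ, List.foldl_append, ihk, List.foldl_cons, List.foldl_nil]
      have hkI : ((k : Nat) : Int) < length := by omega
      have hkN : ((k : Nat) : Int) < (l.length : Int) := by omega
      unfold pvBStep
      rw [PySem.Int.mod_eq_emod_of_pos hN,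
        PySem.List.pySetD_of_nonneg _ _ (Int.emod_nonneg _ (by omega))]
      have hIlt : ((pos + (k : Int)) % (l.length : Int)).toNat < l.length := by
        have := Int.emod_lt_of_pos (pos + (k : Int)) hN
        have := Int.emod_nonneg (pos + (k : Int)) (show (l.length : Int) ≠ 0 by omega)
        omega
      apply List.ext_getElem (by simp)
      intro j hj hj'
      have hj2 : j < l.length := by simpa using hj'
      rw [List.getElem_set, List.getElem_ofFn]
      have hiff := idx_iff l.length pos j hj2 (k : Int) (by positivity) hkN
      have hiff2 : ((pos + (k : Int)) % (l.length : Int)).toNat = j ↔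
          ((j : Int) - pos) % (l.length : Int) = (k : Int) := by
        have hnn2 : 0 ≤ (pos + (k : Int)) % (l.length : Int) := Int.emod_nonneg _ (by omega)
        constructor
        · intro h; rw [hiff]; omega
        · intro h; have h' := hiff.1 h; omega
      by_cases hcase : ((j : Int) - pos) % (l.length : Int) = (k : Int)
      · rw [if_pos (hiff2.2 hcase), List.getElem_ofFn]
        simp only [Fin.getElem_fin]
        rw [hcase, if_pos (by omega)]
        exact hseg k (by omega)
      · rw [if_neg (fun h => hcase (hiff2.1 h)), List.getElem_ofFn]
        simp only [Fin.getElem_fin]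
        have hmod0 : 0 ≤ ((j : Int) - pos) % (l.length : Int) := Int.emod_nonneg _ (by omega)
        by_cases hlt : ((j : Int) - pos) % (l.length : Int) < (k : Int)
        · rw [if_pos hlt, if_pos (by omega)]
        · rw [if_neg hlt, if_neg (by omega)]

theorem B_main (l : List Int) (pos length : Int) (_hp : 0 ≤ pos) (h1 : 1 ≤ length)
    (h2 : length ≤ (l.length : Int)) :
    swapList_alt l pos length = pvTarget l pos length := by
  have hN : (0 : Int) < (l.length : Int) := by omega
  have hL : ((length.toNat : Nat) : Int) = length := Int.toNat_of_nonneg (by omega)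
  show (List.range length.toNat).foldl
      (pvBStep (((List.range length.toNat).map
        (fun (i : Nat) => PySem.List.pyGetD l (PySem.Int.mod (pos + (i : Int)) (l.length : Int)) 0)).reverse)
        pos (l.length : Int)) l = pvTarget l pos length
  rw [B_loop l pos length _ h1 h2 ?hseg length.toNat (le_refl _)]
  case hseg =>
    intro k hk
    set f : Nat → Int :=
      fun (i : Nat) => PySem.List.pyGetD l (PySem.Int.mod (pos + (i : Int)) (l.length : Int)) 0 with hf
    have hlen : ((List.range length.toNat).map f).reverse.length = length.toNat := by simp
    rw [List.getD_eq_getElem _ _ (by omega), List.getElem_reverse, List.getElem_map,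
      List.getElem_range]
    have hcast : (((((List.range length.toNat).map f).length - 1 - k : Nat)) : Int)
        = length - 1 - (k : Int) := by
      simp only [List.length_map, List.length_range]; omega
    rw [hf]
    simp only []
    rw [PySem.Int.mod_eq_emod_of_pos hN]
    have hnn : 0 ≤ (pos + ((((List.range length.toNat).map f).length - 1 - k : Nat) : Int)) %
        (l.length : Int) := Int.emod_nonneg _ (by omega)
    have hub : (pos + ((((List.range length.toNat).map f).length - 1 - k : Nat) : Int)) %
        (l.length : Int) < (l.length : Int) := Int.emod_lt_of_pos _ hN
    rw [PySem.List.pyGetD_eq_getElem l 0 hnn hub]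
    rw [List.getD_eq_getElem _ _ (by
      have h1' : 0 ≤ (pos + length - 1 - (k : Int)) % (l.length : Int) :=
        Int.emod_nonneg _ (by omega)
      have h2' : (pos + length - 1 - (k : Int)) % (l.length : Int) < (l.length : Int) :=
        Int.emod_lt_of_pos _ hN
      omega)]
    congr 1
    rw [hcast]
    ring_nf
  · simp only [pvTarget, hL]

theorem pop_loop (m : List Int) (P L : Nat) (h : P + L ≤ m.length) :
    ∀ k : Nat, k ≤ L →
      (List.range k).foldl (fun st _ => pvPopStep (P : Int) st) (m, ([] : List Int)) =
        (m.take P ++ m.drop (P + k), (m.drop P).take k) := by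
  intro k
  induction k with
  | zero =>
      intro _
      simp [List.take_append_drop]
  | succ k ih =>
      intro hk
      rw [List.range_succ, List.foldl_append, ih (by omega), List.foldl_cons, List.foldl_nil]
      have hlenf : (m.take P ++ m.drop (P + k)).length = m.length - k := by
        simp [List.length_take, List.length_drop]; omega
      have hPlt : P < (m.take P ++ m.drop (P + k)).length := by omega
      unfold pvPopStep
      have hmin : min (P : Int) (((m.take P ++ m.drop (P + k)).length : Int) - 1) = (P : Int) := by
        rw [hlenf]; omega
      simp only [hmin]
      rw [PySem.List.pop?_natCast _ P hPlt]
      have htkP : (m.take P).length = P := by simp [List.length_take]; omega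
      have hget : (m.take P ++ m.drop (P + k))[P] = m[P + k]'(by omega) := by
        rw [List.getElem_append_right (by omega)]
        simp [htkP, List.getElem_drop]
      have herase : (m.take P ++ m.drop (P + k)).eraseIdx P = m.take P ++ m.drop (P + (k + 1)) := by
        rw [List.eraseIdx_append_of_length_le (by omega), htkP, Nat.sub_self,
          List.drop_eq_getElem_cons (show P + k < m.length by omega), List.eraseIdx_cons_zero,
          show P + k + 1 = P + (k + 1) by omega]
      rw [hget, herase]
      have hkd : k < (m.drop P).length := by simp [List.length_drop]; omega
      rw [List.take_add_one, List.getElem?_eq_getElem hkd]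
      simp [List.getElem_drop]

theorem ins_loop (a c t : List Int) (P : Nat) (hA : a.length = P) :
    ∀ k : Nat, k ≤ t.length →
      (List.range k).foldl (fun st _ => pvInsStep (P : Int) st) (a ++ c, t) =
        (a ++ (t.take k).reverse ++ c, t.drop k) := by
  intro k
  induction k with
  | zero =>
      intro _
      simp
  | succ k ih =>
      intro hk
      rw [List.range_succ, List.foldl_append, ih (by omega), List.foldl_cons, List.foldl_nil]
      unfold pvInsStep
      rw [List.drop_eq_getElem_cons (show k < t.length by omega), PySem.List.pop?_zero_cons,
        List.append_assoc]
      dsimp only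
      rw [PySem.List.insert_natCast _ P _ (by simp [hA])]
      rw [← hA, List.take_left, List.drop_left]
      have hrev : (List.take (k + 1) t).reverse = t[k] :: (List.take k t).reverse := by
        rw [List.take_add_one, List.getElem?_eq_getElem (by omega)]
        simp
      rw [hrev]
      simp [List.append_assoc]
      rfl

theorem pvTarget_getElem (l : List Int) (pos length : Int) (i : Nat)
    (h : i < (pvTarget l pos length).length) :
    (pvTarget l pos length)[i] =
      if ((i : Int) - pos) % (l.length : Int) < length then
        l.getD (((pos + length - 1 - ((i : Int) - pos) % (l.length : Int)) %
          (l.length : Int)).toNat) 0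
      else l[i]'(by simpa [pvTarget] using h) := by
  simp [pvTarget]

theorem core_eq (l : List Int) (pos length : Int) (ew P : Nat)
    (h1 : 1 ≤ length) (hpe : pos = (P : Int) + (ew : Int))
    (hPl : (P : Int) + length ≤ (l.length : Int)) :
    (pvTarget l pos length).rotate ew =
      (l.rotate ew).take P ++ (((l.rotate ew).drop P).take length.toNat).reverse ++
        (l.rotate ew).drop (P + length.toNat) := by
  have hN : 0 < l.length := by omega
  have hL : ((length.toNat : Nat) : Int) = length := Int.toNat_of_nonneg (by omega)
  have hPL : P + length.toNat ≤ l.length := by omega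
  have hmlen : (l.rotate ew).length = l.length := List.length_rotate _ _
  have hTlen : (pvTarget l pos length).length = l.length := by simp [pvTarget]
  have hA : ((l.rotate ew).take P).length = P := by simp [List.length_take]; omega
  have hB : ((((l.rotate ew).drop P).take length.toNat).reverse).length = length.toNat := by
    simp [List.length_take, List.length_drop]; omega
  apply List.ext_getElem
  · simp [pvTarget, List.length_take, List.length_drop]; omega
  intro j hj hj'
  have hjN : j < l.length := by
    rwa [List.length_rotate, hTlen] at hj
  rw [List.getElem_rotate]
  have hiN : (j + ew) % (pvTarget l pos length).length < (pvTarget l pos length).length := by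
    rw [hTlen]; exact Nat.mod_lt _ hN
  rw [pvTarget_getElem l pos length _ hiN]
  have hidx : (j + ew) % (pvTarget l pos length).length = (j + ew) % l.length := by rw [hTlen]
  have hcast : (((j + ew) % (pvTarget l pos length).length : Nat) : Int)
      = ((j : Int) + (ew : Int)) % (l.length : Int) := by
    rw [hidx]; push_cast; ring_nf
  have hd : ((((j + ew) % (pvTarget l pos length).length : Nat) : Int) - pos) %
      (l.length : Int) = ((j : Int) - (P : Int)) % (l.length : Int) := by
    rw [hcast, Int.sub_emod, Int.emod_emod_of_dvd _ dvd_rfl, ← Int.sub_emod, hpe,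
      show (j : Int) + (ew : Int) - ((P : Int) + (ew : Int)) = (j : Int) - (P : Int) by ring]
  rw [hd]
  by_cases hb1 : j < P
  · -- left part: untouched, RHS is (take P m)[j] = m[j]
    have hD : ((j : Int) - (P : Int)) % (l.length : Int) = (j : Int) - P + l.length := by
      have e : ((j : Int) - P + l.length) % (l.length : Int) =
          ((j : Int) - P) % (l.length : Int) := by
        rw [show (j : Int) - P + l.length = (j : Int) - P + (l.length : Int) * 1 by ring,
          Int.add_mul_emod_self_left]
      rw [← e, Int.emod_eq_of_lt (by omega) (by omega)]
    rw [if_neg (by omega)]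
    rw [List.getElem_append_left (by rw [List.length_append, hA, hB]; omega),
      List.getElem_append_left (by rw [hA]; omega), List.getElem_take,
      List.getElem_rotate]
    simp only [hidx]
  · by_cases hb2 : j < P + length.toNat
    · -- middle part: reversed segment
      have hD : ((j : Int) - (P : Int)) % (l.length : Int) = (j : Int) - P :=
        Int.emod_eq_of_lt (by omega) (by omega)
      rw [if_pos (by omega), hD]
      rw [List.getElem_append_left (by rw [List.length_append, hA, hB]; omega),
        List.getElem_append_right (by rw [hA]; omega)]
      rw [List.getElem_reverse, List.getElem_take, List.getElem_drop, List.getElem_rotate]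
      have hB2 : (((l.rotate ew).drop P).take length.toNat).length = length.toNat := by
        simp [List.length_take, List.length_drop]; omega
      simp only [hA, hB2]
      have hnatq : (pos + length - 1 - ((j : Int) - (P : Int))) % (l.length : Int)
          = (((P + (length.toNat - 1 - (j - P)) + ew) % l.length : Nat) : Int) := by
        rw [Int.natCast_mod]
        congr 1
        push_cast
        omega
      rw [hnatq, Int.toNat_natCast, List.getD_eq_getElem _ _ (Nat.mod_lt _ hN)]
    · -- right part: untouched
      have hD : ((j : Int) - (P : Int)) % (l.length : Int) = (j : Int) - P :=
        Int.emod_eq_of_lt (by omega) (by omega)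
      rw [if_neg (by omega)]
      rw [List.getElem_append_right (by rw [List.length_append, hA, hB]; omega)]
      rw [List.getElem_drop, List.getElem_rotate]
      congr 1
      rw [hidx, List.length_append, hA, hB]
      congr 1
      omega

theorem A_main (l : List Int) (pos length : Int) (hp : 0 ≤ pos) (h1 : 1 ≤ length)
    (h2 : length ≤ (l.length : Int)) :
    swapList l pos length = pvTarget l pos length := by
  have hN : 0 < l.length := by omega
  have hL : ((length.toNat : Nat) : Int) = length := Int.toNat_of_nonneg (by omega)
  simp only [swapList]
  split_ifs with hw
  · -- wrap branch
    have hew : ((((l.length : Int)) - pos - length).natAbs : Int) = pos + length - l.length := by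
      omega
    have hP : pos - ((((l.length : Int)) - pos - length).natAbs : Int)
        = ((l.length - length.toNat : Nat) : Int) := by omega
    rw [hP, foldl_range_const pvRot l _, rot_iterate]
    have hPL : (l.length - length.toNat) + length.toNat ≤
        (l.rotate (((l.length : Int)) - pos - length).natAbs).length := by
      rw [List.length_rotate]; omega
    rw [pop_loop _ _ length.toNat hPL length.toNat (le_refl _)]
    have hA' : ((l.rotate (((l.length : Int)) - pos - length).natAbs).take
        (l.length - length.toNat)).length = l.length - length.toNat := by
      simp [List.length_take, List.length_rotate]
    have ht : (((l.rotate (((l.length : Int)) - pos - length).natAbs).drop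
        (l.length - length.toNat)).take length.toNat).length = length.toNat := by
      simp [List.length_take, List.length_drop, List.length_rotate]; omega
    rw [ins_loop _ _ _ _ hA' length.toNat (by rw [ht])]
    rw [List.take_take, min_self]
    rw [foldl_range_const pvUnrot]
    have hcore := core_eq l pos length ((((l.length : Int)) - pos - length).natAbs)
      (l.length - length.toNat) h1 (by omega) (by omega)
    rw [← hcore, ← rot_iterate]
    exact unrot_rot_iterate _ _
  · -- no-wrap branch
    have hP : pos = ((pos.toNat : Nat) : Int) := (Int.toNat_of_nonneg hp).symm
    rw [hP]
    rw [pop_loop l pos.toNat length.toNat (by omega) length.toNat (le_refl _)]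
    have hA' : (l.take pos.toNat).length = pos.toNat := by
      simp [List.length_take]; omega
    have ht : ((l.drop pos.toNat).take length.toNat).length = length.toNat := by
      simp [List.length_take, List.length_drop]; omega
    rw [ins_loop _ _ _ _ hA' length.toNat (by rw [ht])]
    rw [List.take_take, min_self]
    have hcore := core_eq l ((pos.toNat : Nat) : Int) length 0 pos.toNat h1
      (by push_cast; ring) (by omega)
    simp only [List.rotate_zero] at hcore
    exact hcore.symm

-- ===== VERDICT (by name: the statement is the Claim_ definition above) =====
theorem swapList_spec : Claim_equal_swapList := by
  intro l pos length _ hpre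
  obtain ⟨h2, hp, -⟩ := hpre
  unfold Spec_swapList
  by_cases h : length ≤ 0
  · rw [B_trivial l pos length h, A_trivial l pos length h]
  · have h1 : 1 ≤ length := by omega
    have hp' : 0 ≤ pos := by rcases hp with hp | hp; exact hp; omega
    rw [B_main l pos length hp' h1 h2, A_main l pos length hp' h1 h2]
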